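-- pv_equiv track=rewrite | github.com/iGTsan/flow_inspector | suricata_parser.py | convert_port
-- ===== SOURCE A (Python) =====
-- any = "[any]"
--
-- def convert_port(port):
--     if port[0] == '[':
--         return convert_port(port[1:-1].split(',')[-1])
--     if port == "$HTTP_PORTS":
--         return "[80]"
--     if port == "$SSH_PORTS":
--         return "[22]"
--     if port == "any":
--         return any
--     return f"[{port}]"
-- ===== SOURCE B (Python) =====
-- any = "[any]"
--
-- def convert_port(port):
--     while port[0] == '[':
--         port = port[1:-1].split(',')[-1]
--     if port == "$HTTP_PORTS":
--         return "[80]"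
--     if port == "$SSH_PORTS":
--         return "[22]"
--     if port == "any":
--         return any
--     return f"[{port}]"
-- ===== Notes on version B (the rewrite author's own statement) =====
-- stated objective: simpler
-- what changed: The self-recursion (which re-runs the $HTTP_PORTS/$SSH_PORTS/any checks at every level) is replaced by an explicit while loop that strips one bracket layer per iteration and then falls through to the flat checks exactly once.
-- outside the precondition, e.g. on convert_port(''): A raises IndexError, B raises IndexError; on convert_port('[]'): A raises IndexError, B raises IndexError; on convert_port('['): A raises IndexError, B raises IndexError
import Mathlib
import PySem

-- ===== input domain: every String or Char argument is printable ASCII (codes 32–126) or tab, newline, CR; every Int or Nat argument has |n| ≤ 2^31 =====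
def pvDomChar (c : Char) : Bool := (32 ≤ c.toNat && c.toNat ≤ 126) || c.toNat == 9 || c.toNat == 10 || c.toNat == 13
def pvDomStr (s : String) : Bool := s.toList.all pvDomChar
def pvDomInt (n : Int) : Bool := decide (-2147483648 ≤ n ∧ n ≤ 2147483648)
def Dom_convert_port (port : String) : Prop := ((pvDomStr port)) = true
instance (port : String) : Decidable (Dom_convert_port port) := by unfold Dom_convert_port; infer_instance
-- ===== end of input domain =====

-- B replaces A's self-recursion by one explicit bracket-stripping loop followed by the flat checks done once (objective: simpler).

-- ===== PORT A =====
-- A recurses on port[1:-1].split(',')[-1]; the recursion depth is bounded by the string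
-- length (each call strictly shortens the string), so fuel = length + 1 never runs out
-- where Python returns.  l[0]? = none is Python's IndexError (excluded by Pre_).
def convertPortGoA : Nat → List Char → List Char
  | 0, _ => []
  | fuel + 1, l =>
    match l[0]? with
    | none => []
    | some c =>
      if c = '[' then
        convertPortGoA fuel
          (PySem.List.pyGetD
            (PySem.Chars.splitOn (PySem.List.slice l (some 1) (some (-1))) [',']) (-1) [])
      else if l = "$HTTP_PORTS".toList then "[80]".toList
      else if l = "$SSH_PORTS".toList then "[22]".toList
      else if l = "any".toList then "[any]".toList
      else '[' :: (l ++ [']'])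

def convert_port (port : String) : String :=
  String.ofList (convertPortGoA (port.toList.length + 1) port.toList)

-- ===== PORT B =====
-- the flat checks after B's loop
def pvFlat (l : List Char) : List Char :=
  if l = "$HTTP_PORTS".toList then "[80]".toList
  else if l = "$SSH_PORTS".toList then "[22]".toList
  else if l = "any".toList then "[any]".toList
  else '[' :: (l ++ [']'])

-- B's while loop: while port[0] == '[': port = port[1:-1].split(',')[-1]
def pvStrip : Nat → List Char → List Char
  | 0, l => l
  | fuel + 1, l =>
    match l[0]? with
    | none => l
    | some c =>
      if c = '[' then
        pvStrip fuel
          (PySem.List.pyGetD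
            (PySem.Chars.splitOn (PySem.List.slice l (some 1) (some (-1))) [',']) (-1) [])
      else l

def convert_port_alt (port : String) : String :=
  String.ofList (pvFlat (pvStrip (port.toList.length + 1) port.toList))

-- ===== PRECONDITION & SPEC =====
-- the last comma-separated segment of a string: what one stripping step leaves of the interior
def pvLastSeg (m : List Char) : List Char :=
  (m.reverse.takeWhile (fun c => c != ',')).reverse

-- Pre_ excludes EXACTLY the inputs on which A raises IndexError (B's loop raises there too):
-- the empty string, and strings starting with '[' whose single stripping step leaves a last
-- segment whose run of leading '[' reaches its middle, so the recursion strips down to "".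
-- (A strip step keeps only the last comma segment, which is comma-free, so at most the first
-- step ever splits; afterwards each step just drops one char at each end.)
def Pre_convert_port (port : String) : Prop :=
  port.toList ≠ [] ∧
  (port.toList[0]? = some '[' →
    2 * (pvLastSeg port.toList.tail.dropLast).findIdx (fun c => c != '[')
      < (pvLastSeg port.toList.tail.dropLast).length)
instance (port : String) : Decidable (Pre_convert_port port) := by
  unfold Pre_convert_port; infer_instance

def pvWitness_convert_port : String := "[80,443]"

def Spec_convert_port (port : String) (out : String) : Prop := out = convert_port_alt port
instance (port : String) (out : String) : Decidable (Spec_convert_port port out) := by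
  unfold Spec_convert_port; infer_instance

-- ===== CLAIM (what is proved, stated in full; the proofs are below) =====
def Claim_equal_convert_port : Prop :=
  ∀ (port : String), Dom_convert_port port → Pre_convert_port port →
    Spec_convert_port port (convert_port port)

-- ===== LEMMAS AND PROOFS =====

theorem pv_takeWhile_append_stop {p : Char → Bool} (xs ys : List Char)
    (h : ∃ a ∈ xs, p a = false) : (xs ++ ys).takeWhile p = xs.takeWhile p := by
  induction xs with
  | nil => obtain ⟨a, ha, _⟩ := h; simp at ha
  | cons a xs ih =>
    by_cases hpa : p a = true
    · obtain ⟨b, hb, hpb⟩ := h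
      rcases List.mem_cons.mp hb with rfl | hb'
      · rw [hpa] at hpb; cases hpb
      · simp only [List.cons_append, List.takeWhile_cons, hpa, if_true]
        rw [ih ⟨b, hb', hpb⟩]
    · simp only [List.cons_append, List.takeWhile_cons, hpa]
      simp

theorem pv_takeWhile_append_all {p : Char → Bool} (xs ys : List Char)
    (h : ∀ a ∈ xs, p a = true) : (xs ++ ys).takeWhile p = xs ++ ys.takeWhile p := by
  induction xs with
  | nil => simp
  | cons a xs ih =>
    have hpa : p a = true := h a (List.mem_cons_self ..)
    simp only [List.cons_append, List.takeWhile_cons, hpa, if_true]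
    rw [ih fun b hb => h b (List.mem_cons_of_mem _ hb)]

theorem pv_takeWhile_all {p : Char → Bool} (xs : List Char)
    (h : ∀ a ∈ xs, p a = true) : xs.takeWhile p = xs := by
  have := pv_takeWhile_append_all xs [] h
  simpa using this

theorem pv_lastSeg_comma_cons (rest : List Char) :
    pvLastSeg (',' :: rest) = if ',' ∈ rest then pvLastSeg rest else rest := by
  unfold pvLastSeg
  by_cases h : ',' ∈ rest
  · rw [if_pos h]
    rw [List.reverse_cons, pv_takeWhile_append_stop _ _ ⟨',', by simpa using h, by simp⟩]
  · rw [if_neg h]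
    rw [List.reverse_cons, pv_takeWhile_append_all _ _ ?_]
    · simp
    · intro a ha
      simp only [List.mem_reverse] at ha
      have hne : a ≠ ',' := fun hcomma => h (hcomma ▸ ha)
      simpa using hne

theorem pv_lastSeg_cons (c : Char) (rest : List Char) (h : ',' ∈ rest) :
    pvLastSeg (c :: rest) = pvLastSeg rest := by
  unfold pvLastSeg
  rw [List.reverse_cons, pv_takeWhile_append_stop _ _ ⟨',', by simpa using h, by simp⟩]

theorem pv_lastSeg_no_comma (m : List Char) (h : ',' ∉ m) : pvLastSeg m = m := by
  unfold pvLastSeg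
  rw [pv_takeWhile_all]
  · simp
  · intro a ha
    simp only [List.mem_reverse] at ha
    have hne : a ≠ ',' := fun hcomma => h (hcomma ▸ ha)
    simpa using hne

theorem pv_comma_not_mem_lastSeg (m : List Char) : ',' ∉ pvLastSeg m := by
  intro h
  unfold pvLastSeg at h
  rw [List.mem_reverse] at h
  have := List.mem_takeWhile_imp h
  simp at this

theorem pv_lastSeg_length_le (m : List Char) : (pvLastSeg m).length ≤ m.length := by
  unfold pvLastSeg
  calc (m.reverse.takeWhile (fun c => c != ',')).reverse.length
      = (m.reverse.takeWhile (fun c => c != ',')).length := List.length_reverse ..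
    _ ≤ m.reverse.length := (List.takeWhile_sublist _).length_le
    _ = m.length := List.length_reverse ..

theorem pv_go_getLast :
    ∀ (fuel : Nat) (l cur : List Char) (acc : List (List Char)), l.length < fuel →
      (PySem.Chars.splitOn.go [','] fuel l cur acc).getLast?
        = some (if ',' ∈ l then pvLastSeg l else cur.reverse ++ l) := by
  intro fuel
  induction fuel with
  | zero => intro l cur acc h; omega
  | succ f ih =>
    intro l cur acc hlen
    cases l with
    | nil => simp [PySem.Chars.splitOn.go]
    | cons c rest =>
      by_cases hc : c = ','
      · subst hc
        have hpre : ([','].isPrefixOf (',' :: rest)) = true := by simp [List.isPrefixOf]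
        rw [PySem.Chars.splitOn.go]
        simp only [hpre, if_true]
        have hdrop : List.drop ([','].length) (',' :: rest) = rest := rfl
        rw [hdrop]
        rw [ih rest [] _ (by simpa using Nat.lt_of_succ_lt_succ hlen)]
        rw [pv_lastSeg_comma_cons]
        simp
      · have hpre : ([','].isPrefixOf (c :: rest)) = false := by
          have hcc : (',' == c) = false := by
            simp only [beq_eq_false_iff_ne, ne_eq]
            intro hcc
            exact hc hcc.symm
          simp [List.isPrefixOf, hcc]
        rw [PySem.Chars.splitOn.go]
        simp only [hpre, Bool.false_eq_true, if_false]
        rw [ih rest (c :: cur) acc (by simpa using Nat.lt_of_succ_lt_succ hlen)]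
        have hmem : (',' ∈ c :: rest) ↔ (',' ∈ rest) := by
          constructor
          · intro h
            rcases List.mem_cons.mp h with h' | h'
            · exact absurd h'.symm hc
            · exact h'
          · exact List.mem_cons_of_mem _
        by_cases h : ',' ∈ rest
        · rw [if_pos h, if_pos (List.mem_cons_of_mem _ h), pv_lastSeg_cons c rest h]
        · rw [if_neg h, if_neg (fun hx => h (hmem.mp hx))]
          simp

theorem pv_splitOn_getLast (m : List Char) :
    (PySem.Chars.splitOn m [',']).getLast? = some (pvLastSeg m) := by
  unfold PySem.Chars.splitOn
  rw [pv_go_getLast _ _ _ _ (by omega)]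
  by_cases h : ',' ∈ m
  · rw [if_pos h]
  · rw [if_neg h, pv_lastSeg_no_comma m h]
    simp

theorem pv_slice_one_neg_one (l : List Char) :
    PySem.List.slice l (some 1) (some (-1)) = l.tail.dropLast := by
  cases l with
  | nil => rfl
  | cons c t =>
    have ha : PySem.List.clampIdx (t.length + 1) 1 = 1 := by
      simp [PySem.List.clampIdx]
    have hb : PySem.List.clampIdx (t.length + 1) (-1) = t.length := by
      simp only [PySem.List.clampIdx]
      rw [if_pos (by omega), if_neg (by omega)]
      omega
    simp only [PySem.List.slice, List.length_cons, ha, hb, List.tail_cons,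
      List.dropLast_eq_take]
    simp

-- one stripping step, shared by both ports: port[1:-1].split(',')[-1] = pvLastSeg of the interior
theorem pv_next_eq (l : List Char) :
    PySem.List.pyGetD
      (PySem.Chars.splitOn (PySem.List.slice l (some 1) (some (-1))) [',']) (-1) []
      = pvLastSeg l.tail.dropLast := by
  rw [pv_slice_one_neg_one]
  obtain ⟨ys, hys⟩ := List.getLast?_eq_some_iff.mp (pv_splitOn_getLast l.tail.dropLast)
  rw [hys, PySem.List.pyGetD_neg_one_append_singleton]

theorem pv_step_flat (fuel : Nat) (l : List Char) (c : Char)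
    (h0 : l[0]? = some c) (hc : c ≠ '[') :
    convertPortGoA (fuel + 1) l = pvFlat l ∧ pvStrip (fuel + 1) l = l := by
  constructor
  · rw [convertPortGoA, h0]
    simp [hc, pvFlat]
  · rw [pvStrip, h0]
    simp [hc]

-- on a comma-free string the iteration is pure end-stripping; j = index of first non-'['
theorem pv_main :
    ∀ (j : Nat) (l : List Char) (fuel : Nat),
      (∀ k, k < j → l[k]? = some '[') →
      (∃ c, l[j]? = some c ∧ c ≠ '[') →
      ',' ∉ l → 2 * j < l.length → l.length < fuel →
      convertPortGoA fuel l = pvFlat (pvStrip fuel l) := by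
  intro j
  induction j with
  | zero =>
    intro l fuel _ hj _ _ hfuel
    obtain ⟨c, h0, hc⟩ := hj
    cases fuel with
    | zero => omega
    | succ f =>
      obtain ⟨hA, hB⟩ := pv_step_flat f l c h0 hc
      rw [hA, hB]
  | succ j ih =>
    intro l fuel hpre hj hcomma hlen hfuel
    have h0 : l[0]? = some '[' := hpre 0 (Nat.succ_pos _)
    cases l with
    | nil => simp at h0
    | cons c t =>
      have hc : c = '[' := by simpa using h0
      subst hc
      cases fuel with
      | zero => omega
      | succ f =>
        have hct : ',' ∉ t := fun h => hcomma (List.mem_cons_of_mem _ h)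
        have hnext : PySem.List.pyGetD
            (PySem.Chars.splitOn (PySem.List.slice ('[' :: t) (some 1) (some (-1))) [','])
            (-1) [] = t.dropLast := by
          rw [pv_next_eq]
          exact pv_lastSeg_no_comma _ fun h => hct (List.mem_of_mem_dropLast (by simpa using h))
        have hlen' : 2 * (j + 1) < t.length + 1 := by simpa using hlen
        have hAstep : convertPortGoA (f + 1) ('[' :: t)
            = convertPortGoA f t.dropLast := by
          rw [convertPortGoA]
          simp [hnext]
        have hBstep : pvStrip (f + 1) ('[' :: t) = pvStrip f t.dropLast := by
          rw [pvStrip]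
          simp [hnext]
        rw [hAstep, hBstep]
        obtain ⟨c', hj', hc'⟩ := hj
        have hjt : t[j]? = some c' := by simpa using hj'
        have hjlt : j < t.length - 1 := by
          have : j < t.length := (List.getElem?_eq_some_iff.mp hjt).1
          omega
        apply ih t.dropLast f
        · intro k hk
          have hkp : ('[' :: t)[k + 1]? = some '[' := hpre (k + 1) (by omega)
          have hkt : t[k]? = some '[' := by simpa using hkp
          rw [List.getElem?_dropLast, if_pos (by omega)]
          exact hkt
        · exact ⟨c', by rw [List.getElem?_dropLast, if_pos hjlt]; exact hjt, hc'⟩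
        · exact fun h => hct (List.mem_of_mem_dropLast h)
        · simpa [List.length_dropLast] using (by omega : 2 * j < t.length - 1)
        · have : t.length < f := by simpa using Nat.lt_of_succ_lt_succ hfuel
          simp only [List.length_dropLast]
          omega

-- ===== VERDICT (by name: the statement is the Claim_ definition above) =====
theorem convert_port_spec : Claim_equal_convert_port := by
  unfold Claim_equal_convert_port
  intro port _ hpre
  obtain ⟨hne, hbr⟩ := hpre
  show convert_port port = convert_port_alt port
  unfold convert_port convert_port_alt
  cases hl : port.toList with
  | nil => exact absurd hl hne
  | cons c0 t =>
    rw [hl] at hbr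
    by_cases hc : c0 = '['
    · subst hc
      have hcond := hbr rfl
      set u := pvLastSeg (('[' :: t).tail.dropLast) with hu
      have hnext : PySem.List.pyGetD
          (PySem.Chars.splitOn (PySem.List.slice ('[' :: t) (some 1) (some (-1))) [','])
          (-1) [] = u := pv_next_eq _
      have hAstep : convertPortGoA (('[' :: t).length + 1) ('[' :: t)
          = convertPortGoA (t.length + 1) u := by
        rw [show ('[' :: t).length + 1 = (t.length + 1) + 1 by simp, convertPortGoA]
        simp [hnext]
      have hBstep : pvStrip (('[' :: t).length + 1) ('[' :: t)
          = pvStrip (t.length + 1) u := by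
        rw [show ('[' :: t).length + 1 = (t.length + 1) + 1 by simp, pvStrip]
        simp [hnext]
      rw [hAstep, hBstep]
      set j := u.findIdx (fun c => c != '[') with hjdef
      have hjle : j ≤ u.length := List.findIdx_le_length
      have hjlt : j < u.length := by omega
      congr 1
      apply pv_main j u (t.length + 1)
      · intro k hk
        have hkl : k < u.length := lt_trans hk hjlt
        have hnot := List.not_of_lt_findIdx (p := fun c => c != '[') (xs := u)
          (i := k) (by simpa [hjdef] using hk)
        simp only [bne_eq_false_iff_eq] at hnot
        rw [List.getElem?_eq_getElem hkl]
        exact congrArg some hnot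
      · refine ⟨u[j], List.getElem?_eq_getElem hjlt, ?_⟩
        have := List.findIdx_getElem (p := fun c => c != '[') (xs := u) (w := hjlt)
        simpa using this
      · exact pv_comma_not_mem_lastSeg _
      · exact hcond
      · have : u.length ≤ t.length := by
          calc u.length ≤ (('[' :: t).tail.dropLast).length := pv_lastSeg_length_le _
            _ ≤ t.length := by simp [List.length_dropLast]
        omega
    · obtain ⟨hA, hB⟩ := pv_step_flat ((c0 :: t).length) (c0 :: t) c0 rfl hc
      rw [hA, hB]
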